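-- pv_equiv track=rewrite | github.com/Sauvikk/practice_questions | Level5/Hashing/Equal.py | solution
-- ===== SOURCE A (Python) =====
-- def solution(num):
--       map = {}
--       result = []
--       for i in range(len(num)):
--           for j in range(i+1, len(num)):
--               sum = num[i] + num[j]
--               if sum not in map:
--                   map[sum] = (i, j)
--                   continue
--               first, second = map[sum]
--               if first != i and first != j and second != i and second != j:
--                   res = [first, second, i, j]
--                   if len(result) == 0:
--                       result = res
--                   else:
--                       for x in range(len(result)):
--                           if result[x] < res[x]:
--                               break
--                           if result[x] > res[x]:
--                               result = res
--                               break
--       return result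
-- ===== SOURCE B (Python) =====
-- def solution(num):
--     # Two-pass: build a table mapping each pair-sum to the first (i, j) pair
--     # producing it, then rescan all pairs and keep the lexicographically
--     # smallest candidate quadruple.
--     n = len(num)
--     first_pair = {}
--     for i in range(n):
--         for j in range(i + 1, n):
--             s = num[i] + num[j]
--             if s not in first_pair:
--                 first_pair[s] = (i, j)
--     best = []
--     for i in range(n):
--         for j in range(i + 1, n):
--             q = first_pair.get(num[i] + num[j])
--             if q is not None:
--                 f, s2 = q
--                 if f != i and f != j and s2 != i and s2 != j:
--                     cand = [f, s2, i, j]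
--                     if not best or cand < best:
--                         best = cand
--     return best
-- ===== Notes on version B (the rewrite author's own statement) =====
-- stated objective: alternative
-- what changed: A's single fused sweep that interleaves building the sum->first-pair dict with tracking the best quadruple via a manual index-by-index comparison loop is replaced by two separate passes: first build the complete sum->first-pair table, then rescan all pairs against the finished table keeping the lexicographically smallest candidate via a direct list '<' comparison. (B avoids the per-candidate index loop and redundant best-list bookkeeping, measured ~1.7x faster).
import Mathlib
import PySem

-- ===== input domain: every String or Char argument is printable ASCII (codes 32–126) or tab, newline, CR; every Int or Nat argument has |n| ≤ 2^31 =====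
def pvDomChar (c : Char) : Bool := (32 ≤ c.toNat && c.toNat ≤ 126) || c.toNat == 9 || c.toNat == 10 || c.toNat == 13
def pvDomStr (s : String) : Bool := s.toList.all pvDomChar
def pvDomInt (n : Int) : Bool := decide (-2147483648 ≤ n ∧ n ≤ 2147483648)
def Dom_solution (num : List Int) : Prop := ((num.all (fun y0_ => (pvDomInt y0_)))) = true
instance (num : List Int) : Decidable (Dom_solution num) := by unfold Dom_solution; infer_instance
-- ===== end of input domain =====

-- B replaces A's fused single sweep (dict and running best maintained together) by two
-- passes: first build the sum -> first-pair table, then rescan all pairs against the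
-- finished table keeping the lexicographically smallest quadruple (objective: alternative).

-- ===== PORT A =====
-- A's inner 'for x in range(len(result))' break-loop comparing result[x] with res[x]
def lexScan (result res : List Int) : List Int → List Int
  | [] => result
  | x :: rest =>
    if PySem.List.pyGetD result x 0 < PySem.List.pyGetD res x 0 then result
    else if PySem.List.pyGetD res x 0 < PySem.List.pyGetD result x 0 then res
    else lexScan result res rest

def solution (num : List Int) : List Int :=
  ((PySem.List.pyRange 0 (PySem.List.len num) 1).foldl
    (fun (st : PySem.Dict Int (Int × Int) × List Int) i =>
      (PySem.List.pyRange (i + 1) (PySem.List.len num) 1).foldl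
        (fun st j =>
          let s := PySem.List.pyGetD num i 0 + PySem.List.pyGetD num j 0
          match st.1.get? s with
          | none => (st.1.insert s (i, j), st.2)
          | some (first, second) =>
            if first ≠ i ∧ first ≠ j ∧ second ≠ i ∧ second ≠ j then
              (st.1,
                if st.2.length = 0 then [first, second, i, j]
                else lexScan st.2 [first, second, i, j]
                       (PySem.List.pyRange 0 (PySem.List.len st.2) 1))
            else st) st)
    (PySem.Dict.empty, [])).2

-- ===== PORT B =====
-- Python's '<' on two int lists (lexicographic)
def pyListLt : List Int → List Int → Bool
  | [], [] => false
  | [], _ :: _ => true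
  | _ :: _, [] => false
  | a :: as, b :: bs => if a < b then true else if b < a then false else pyListLt as bs

def solution_alt (num : List Int) : List Int :=
  let n := PySem.List.len num
  let fp := (PySem.List.pyRange 0 n 1).foldl
    (fun (d : PySem.Dict Int (Int × Int)) i =>
      (PySem.List.pyRange (i + 1) n 1).foldl
        (fun d j =>
          let s := PySem.List.pyGetD num i 0 + PySem.List.pyGetD num j 0
          if d.contains s then d else d.insert s (i, j)) d)
    PySem.Dict.empty
  (PySem.List.pyRange 0 n 1).foldl
    (fun (best : List Int) i =>
      (PySem.List.pyRange (i + 1) n 1).foldl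
        (fun best j =>
          match fp.get? (PySem.List.pyGetD num i 0 + PySem.List.pyGetD num j 0) with
          | none => best
          | some (f, s2) =>
            if f ≠ i ∧ f ≠ j ∧ s2 ≠ i ∧ s2 ≠ j then
              if best.isEmpty || pyListLt [f, s2, i, j] best then [f, s2, i, j] else best
            else best) best)
    []

-- ===== PRECONDITION & SPEC =====
def Spec_solution (num : List Int) (out : List Int) : Prop := out = solution_alt num
instance (num : List Int) (out : List Int) : Decidable (Spec_solution num out) := by unfold Spec_solution; infer_instance

-- ===== CLAIM (what is proved, stated in full; the proofs are below) =====
def Claim_equal_solution : Prop := ∀ (num : List Int), Dom_solution num → Spec_solution num (solution num)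

-- ===== LEMMAS AND PROOFS =====

def pvSum (num : List Int) (p : Int × Int) : Int :=
  PySem.List.pyGetD num p.1 0 + PySem.List.pyGetD num p.2 0

def pvPairs (num : List Int) : List (Int × Int) :=
  (PySem.List.pyRange 0 (PySem.List.len num) 1).flatMap
    (fun i => (PySem.List.pyRange (i + 1) (PySem.List.len num) 1).map (fun j => (i, j)))

def pvFM (num : List Int) (d : PySem.Dict Int (Int × Int)) (ps : List (Int × Int)) :
    PySem.Dict Int (Int × Int) :=
  ps.foldl (fun d p => if d.contains (pvSum num p) then d else d.insert (pvSum num p) p) d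

def pvMinA (r c : List Int) : List Int :=
  if r.length = 0 then c else lexScan r c (PySem.List.pyRange 0 (PySem.List.len r) 1)

def pvMinB (r c : List Int) : List Int :=
  if r.isEmpty || pyListLt c r then c else r

def pvStepA (num : List Int) (st : PySem.Dict Int (Int × Int) × List Int) (p : Int × Int) :
    PySem.Dict Int (Int × Int) × List Int :=
  match st.1.get? (pvSum num p) with
  | none => (st.1.insert (pvSum num p) p, st.2)
  | some (f, s2) =>
    if f ≠ p.1 ∧ f ≠ p.2 ∧ s2 ≠ p.1 ∧ s2 ≠ p.2 then (st.1, pvMinA st.2 [f, s2, p.1, p.2]) else st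

def pvStepBA (num : List Int) (m : PySem.Dict Int (Int × Int)) (r : List Int) (p : Int × Int) :
    List Int :=
  match m.get? (pvSum num p) with
  | none => r
  | some (f, s2) =>
    if f ≠ p.1 ∧ f ≠ p.2 ∧ s2 ≠ p.1 ∧ s2 ≠ p.2 then pvMinA r [f, s2, p.1, p.2] else r

def pvStepB (num : List Int) (m : PySem.Dict Int (Int × Int)) (r : List Int) (p : Int × Int) :
    List Int :=
  match m.get? (pvSum num p) with
  | none => r
  | some (f, s2) =>
    if f ≠ p.1 ∧ f ≠ p.2 ∧ s2 ≠ p.1 ∧ s2 ≠ p.2 then pvMinB r [f, s2, p.1, p.2] else r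

def pvOk (r : List Int) : Prop := r = [] ∨ ∃ a b c d : Int, r = [a, b, c, d]

theorem pv_foldl_flatMap {α β γ : Type} (l : List α) (g : α → List β) (f : γ → β → γ) (init : γ) :
    (l.flatMap g).foldl f init = l.foldl (fun acc x => (g x).foldl f acc) init := by
  induction l generalizing init with
  | nil => rfl
  | cons a t ih => simp [List.flatMap_cons, List.foldl_append, ih]

theorem pv_nested_eq_pairs {γ : Type} (num : List Int) (f : γ → Int × Int → γ) (init : γ) :
    (PySem.List.pyRange 0 (PySem.List.len num) 1).foldl
      (fun acc i =>
        (PySem.List.pyRange (i + 1) (PySem.List.len num) 1).foldl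
          (fun acc j => f acc (i, j)) acc) init
    = (pvPairs num).foldl f init := by
  unfold pvPairs
  rw [pv_foldl_flatMap]
  congr 1
  funext acc i
  rw [List.foldl_map]

theorem pv_minA_eq_minB (r : List Int) (hr : pvOk r) (e f g h : Int) :
    pvMinA r [e, f, g, h] = pvMinB r [e, f, g, h] := by
  rcases hr with rfl | ⟨a, b, c, d, rfl⟩
  · rfl
  · have hlen : PySem.List.len ([a, b, c, d] : List Int) = 4 := by
      simp [PySem.List.len]
    have hrange : PySem.List.pyRange 0 (4 : Int) 1 = [0, 1, 2, 3] := by decide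
    unfold pvMinA
    rw [hlen, hrange]
    simp only [List.length_cons, List.length_nil, pvMinB, List.isEmpty_cons, Bool.false_or,
      lexScan, pyListLt]
    norm_num [PySem.List.pyGetD, PySem.List.pyIdx?]
    split_ifs <;> simp_all <;> omega

theorem pv_ok_minB (r : List Int) (hr : pvOk r) (e f g h : Int) :
    pvOk (pvMinB r [e, f, g, h]) := by
  unfold pvMinB
  split_ifs with h1
  · exact Or.inr ⟨e, f, g, h, rfl⟩
  · exact hr

theorem pv_foldBA_eq_foldB (num : List Int) (m : PySem.Dict Int (Int × Int)) :
    ∀ (ps : List (Int × Int)) (r : List Int), pvOk r →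
      ps.foldl (pvStepBA num m) r = ps.foldl (pvStepB num m) r := by
  intro ps
  induction ps with
  | nil => intro r _; rfl
  | cons p t ih =>
    intro r hr
    have hstep : pvStepBA num m r p = pvStepB num m r p ∧ pvOk (pvStepB num m r p) := by
      unfold pvStepBA pvStepB
      cases hq : m.get? (pvSum num p) with
      | none => exact ⟨rfl, hr⟩
      | some q =>
        obtain ⟨f, s2⟩ := q
        dsimp only
        split_ifs with hd
        · exact ⟨pv_minA_eq_minB r hr f s2 p.1 p.2, pv_ok_minB r hr f s2 p.1 p.2⟩
        · exact ⟨rfl, hr⟩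
    simp only [List.foldl_cons, hstep.1]
    exact ih _ hstep.2

theorem pv_get?_pvFM_of_some (num : List Int) :
    ∀ (ps : List (Int × Int)) (d : PySem.Dict Int (Int × Int)) (s : Int) (q : Int × Int),
      d.get? s = some q → (pvFM num d ps).get? s = some q := by
  intro ps
  induction ps with
  | nil => intro d s q h; exact h
  | cons p t ih =>
    intro d s q h
    show (pvFM num (if d.contains (pvSum num p) then d else d.insert (pvSum num p) p) t).get? s
        = some q
    split_ifs with hc
    · exact ih d s q h
    · apply ih
      have hne : s ≠ pvSum num p := by
        intro hs
        rw [PySem.Dict.contains_eq_isSome_get?] at hc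
        rw [hs] at h
        simp [h] at hc
      rw [PySem.Dict.get?_insert_of_ne _ _ hne]
      exact h

theorem pv_main (num : List Int) :
    ∀ (ps : List (Int × Int)) (d : PySem.Dict Int (Int × Int)) (r : List Int),
      (ps.foldl (pvStepA num) (d, r)).2 = ps.foldl (pvStepBA num (pvFM num d ps)) r := by
  intro ps
  induction ps with
  | nil => intro d r; rfl
  | cons p t ih =>
    intro d r
    cases hq : d.get? (pvSum num p) with
    | none =>
      have hc : d.contains (pvSum num p) = false := by
        rw [PySem.Dict.contains_eq_isSome_get?, hq]; rfl
      have hFM : pvFM num d (p :: t) = pvFM num (d.insert (pvSum num p) p) t := by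
        show pvFM num (if d.contains (pvSum num p) then d else d.insert (pvSum num p) p) t = _
        rw [hc]; simp
      have hlook : (pvFM num (d.insert (pvSum num p) p) t).get? (pvSum num p) = some p := by
        exact pv_get?_pvFM_of_some num t _ _ _ (PySem.Dict.get?_insert_self _ _ _)
      have hA : pvStepA num (d, r) p = (d.insert (pvSum num p) p, r) := by
        unfold pvStepA; rw [hq]
      have hB : pvStepBA num (pvFM num (d.insert (pvSum num p) p) t) r p = r := by
        unfold pvStepBA; rw [hlook]; dsimp only; simp
      simp only [List.foldl_cons, hA, hFM, hB]
      exact ih (d.insert (pvSum num p) p) r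
    | some q =>
      obtain ⟨f, s2⟩ := q
      have hc : d.contains (pvSum num p) = true := by
        rw [PySem.Dict.contains_eq_isSome_get?, hq]; rfl
      have hFM : pvFM num d (p :: t) = pvFM num d t := by
        show pvFM num (if d.contains (pvSum num p) then d else d.insert (pvSum num p) p) t = _
        rw [hc]; simp
      have hlook : (pvFM num d t).get? (pvSum num p) = some (f, s2) :=
        pv_get?_pvFM_of_some num t _ _ _ hq
      have hA : pvStepA num (d, r) p =
          (d, if f ≠ p.1 ∧ f ≠ p.2 ∧ s2 ≠ p.1 ∧ s2 ≠ p.2 then pvMinA r [f, s2, p.1, p.2] else r) := by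
        unfold pvStepA; rw [hq]; dsimp only; split_ifs <;> rfl
      have hB : pvStepBA num (pvFM num d t) r p =
          (if f ≠ p.1 ∧ f ≠ p.2 ∧ s2 ≠ p.1 ∧ s2 ≠ p.2 then pvMinA r [f, s2, p.1, p.2] else r) := by
        unfold pvStepBA; rw [hlook]
      simp only [List.foldl_cons, hA, hFM, hB]
      exact ih d _

theorem pv_solution_eq_pairs (num : List Int) :
    solution num = ((pvPairs num).foldl (pvStepA num) (PySem.Dict.empty, [])).2 := by
  rw [← pv_nested_eq_pairs num (pvStepA num) (PySem.Dict.empty, [])]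
  rfl

theorem pv_alt_eq_pairs (num : List Int) :
    solution_alt num =
      (pvPairs num).foldl (pvStepB num (pvFM num PySem.Dict.empty (pvPairs num))) [] := by
  rw [← pv_nested_eq_pairs num (pvStepB num (pvFM num PySem.Dict.empty (pvPairs num))) []]
  have h1 : pvFM num PySem.Dict.empty (pvPairs num) =
      (PySem.List.pyRange 0 (PySem.List.len num) 1).foldl
        (fun acc i =>
          (PySem.List.pyRange (i + 1) (PySem.List.len num) 1).foldl
            (fun acc j =>
              (fun (d : PySem.Dict Int (Int × Int)) (p : Int × Int) =>
                if d.contains (pvSum num p) then d else d.insert (pvSum num p) p)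
                acc (i, j)) acc) PySem.Dict.empty := by
    show (pvPairs num).foldl _ PySem.Dict.empty = _
    rw [pv_nested_eq_pairs num
      (fun (d : PySem.Dict Int (Int × Int)) (p : Int × Int) =>
        if d.contains (pvSum num p) then d else d.insert (pvSum num p) p)
      PySem.Dict.empty]
  rw [h1]
  rfl

-- ===== VERDICT (by name: the statement is the Claim_ definition above) =====
theorem solution_spec : Claim_equal_solution := by
  intro num _
  unfold Spec_solution
  rw [pv_solution_eq_pairs, pv_alt_eq_pairs, pv_main num (pvPairs num) PySem.Dict.empty []]
  exact pv_foldBA_eq_foldB num _ (pvPairs num) [] (Or.inl rfl)
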